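-- pv_equiv track=rewrite | github.com/PetitCoinCoin/advent-of-code | 2016/day_11.py | is_valid_together
-- ===== SOURCE A (Python) =====
-- def is_valid_together(combination: tuple, all_elements: list) -> bool:
--     microchip = [c for c in combination if c[-1] == "M"]
--     if len(microchip) == 1 and len(combination) > 1 and microchip[0][:-1] + "G" not in combination:
--         # Two items in combination are not compatible with each other
--         return False
--     elements = [elt for elt in all_elements if elt not in combination]
--     for elt in [elt for elt in elements if elt[-1] == "M"]:
--         if elt[:-1] + "G" not in elements and [e for e in elements if e[-1] == "G"]:
--             return False
--     return True
-- ===== SOURCE B (Python) =====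
-- def is_valid_together(combination, all_elements):
--     # combination check: one counting pass remembering the lone chip
--     chips = 0
--     last_chip = ""
--     for c in combination:
--         if c[-1] == "M":
--             chips += 1
--             last_chip = c
--     if chips == 1 and len(combination) > 1 and last_chip[:-1] + "G" not in combination:
--         return False
--     # leftover check: sort the leftovers by element name, then one run-scan;
--     # equal-name items become contiguous, so a run with a chip but no generator
--     # is an unprotected chip
--     combo = set(combination)
--     rest = sorted((e for e in all_elements if e not in combo), key=lambda e: e[:-1])
--     has_gen = False
--     bad = False
--     cur = None
--     run_gen = False
--     run_chip = False
--     for e in rest: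
--         stem = e[:-1]
--         if cur != stem:
--             if run_chip and not run_gen:
--                 bad = True
--             cur = stem
--             run_gen = False
--             run_chip = False
--         if e[-1] == "G":
--             run_gen = True
--             has_gen = True
--         elif e[-1] == "M":
--             run_chip = True
--     if run_chip and not run_gen:
--         bad = True
--     return not (has_gen and bad)
-- ===== Notes on version B (the rewrite author's own statement) =====
-- stated objective: faster
-- what changed: A rescans the leftover list (and rebuilds the generator list) for every unmatched microchip; B sorts the leftovers by element name and detects unprotected chips in a single run-scan over the sorted list (plus one counting pass over the combination), O(n log n) instead of O(n^2).
-- outside the precondition, e.g. on is_valid_together(('aM', 'xG'), ['']): A returns False, B returns False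
import Mathlib
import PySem

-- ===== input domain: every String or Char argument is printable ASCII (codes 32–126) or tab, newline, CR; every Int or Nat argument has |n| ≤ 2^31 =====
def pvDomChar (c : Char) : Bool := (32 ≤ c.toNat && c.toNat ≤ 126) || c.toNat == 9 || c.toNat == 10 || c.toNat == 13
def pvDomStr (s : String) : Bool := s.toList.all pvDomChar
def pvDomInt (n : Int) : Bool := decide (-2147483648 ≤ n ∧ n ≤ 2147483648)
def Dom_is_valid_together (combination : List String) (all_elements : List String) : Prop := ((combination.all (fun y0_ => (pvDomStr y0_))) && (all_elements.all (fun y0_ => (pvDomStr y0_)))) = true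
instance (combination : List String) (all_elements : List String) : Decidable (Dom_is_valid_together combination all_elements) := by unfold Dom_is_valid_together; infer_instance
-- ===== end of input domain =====

-- B replaces A's per-chip rescans of the leftover list by sorting the leftovers by element
-- name and detecting unprotected chips in one run-scan over the sorted list; equivalence is
-- on the return value (A mutates nothing).

-- ===== PORT A =====
-- s[-1]  (none = IndexError)
def pvLast (s : String) : Option Char := PySem.Str.pyGet? s (-1)
-- elt[:-1] + "G"  (concatenation written via String.ofList; exact on all strings)
def pvGenOf (s : String) : String := String.ofList ((PySem.Str.slice s none (some (-1))).toList ++ ['G'])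

def is_valid_together (combination : List String) (all_elements : List String) : Bool :=
  let microchip := combination.filter (fun c => pvLast c == some 'M')
  if microchip.length == 1 && decide (combination.length > 1)
      && !(combination.contains (pvGenOf (microchip.headD ""))) then
    false
  else
    let elements := all_elements.filter (fun elt => !(combination.contains elt))
    if (elements.filter (fun elt => pvLast elt == some 'M')).any (fun elt =>
         !(elements.contains (pvGenOf elt))
           && !((elements.filter (fun e => pvLast e == some 'G')).isEmpty)) then
      false
    else
      true

-- ===== PORT B =====
-- s[:-1]
def pvStem (s : String) : String := PySem.Str.slice s none (some (-1))
-- name + "G"  (concatenation written via String.ofList; exact on all strings)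
def pvAddG (s : String) : String := String.ofList (s.toList ++ ['G'])

-- first loop of Source B: count the chips in the combination, remember the last one seen
def pvCount (comb : List String) : Int × String :=
  comb.foldl (fun (st : Int × String) c => if pvLast c == some 'M' then (st.1 + 1, c) else st)
    ((0 : Int), "")

-- Source B's scan state: cur, run_gen, run_chip, has_gen, bad
structure BState where
  cur : Option String
  rg : Bool
  rc : Bool
  hg : Bool
  bad : Bool
deriving DecidableEq, Repr

-- one iteration of Source B's run-scan over the sorted leftovers
def pvStepB (st : BState) (e : String) : BState :=
  let stem := pvStem e
  let st1 : BState :=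
    if st.cur ≠ some stem then
      { cur := some stem, rg := false, rc := false, hg := st.hg,
        bad := st.bad || (st.rc && !st.rg) }
    else st
  if pvLast e == some 'G' then { st1 with rg := true, hg := true }
  else if pvLast e == some 'M' then { st1 with rc := true }
  else st1

def is_valid_together_alt (combination : List String) (all_elements : List String) : Bool :=
  let cs := pvCount combination
  if cs.1 == 1 && decide (combination.length > 1)
      && !(combination.contains (pvAddG (pvStem cs.2))) then
    false
  else
    let rest := PySem.List.sorted
      (all_elements.filter (fun e => !(PySem.Set.contains (PySem.Set.ofList combination) e)))
      (fun e => pvStem e)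
    let st := rest.foldl pvStepB ⟨none, false, false, false, false⟩
    !(st.hg && (st.bad || (st.rc && !st.rg)))

-- ===== PRECONDITION & SPEC =====
-- Pre_ excludes inputs containing the empty string: Python's s[-1] raises IndexError on "" in
-- either list, except in the cases where an earlier incompatibility makes both programs return
-- False before reaching it (see the cite in claim.json).
def Pre_is_valid_together (combination : List String) (all_elements : List String) : Prop :=
  (∀ s ∈ combination, s ≠ "") ∧ (∀ s ∈ all_elements, s ≠ "")
instance (combination : List String) (all_elements : List String) : Decidable (Pre_is_valid_together combination all_elements) := by unfold Pre_is_valid_together; infer_instance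

def pvWitness_is_valid_together : List String × List String := (["aM", "aG"], ["aM", "aG", "bM", "bG"])

def Spec_is_valid_together (combination : List String) (all_elements : List String) (out : Bool) : Prop := out = is_valid_together_alt combination all_elements
instance (combination : List String) (all_elements : List String) (out : Bool) : Decidable (Spec_is_valid_together combination all_elements out) := by unfold Spec_is_valid_together; infer_instance

-- ===== CLAIM (what is proved, stated in full; the proofs are below) =====
def Claim_equal_is_valid_together : Prop := ∀ (combination : List String) (all_elements : List String), Dom_is_valid_together combination all_elements → Pre_is_valid_together combination all_elements → Spec_is_valid_together combination all_elements (is_valid_together combination all_elements)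

-- ===== LEMMAS AND PROOFS =====

theorem pvGenOf_eq_pvAddG_pvStem (s : String) : pvGenOf s = pvAddG (pvStem s) := rfl

theorem pvStem_toList (s : String) : (pvStem s).toList = s.toList.dropLast :=
  PySem.Str.slice_to_neg_one s

theorem pvLast_eq (s : String) : pvLast s = s.toList.getLast? := by
  simp [pvLast, PySem.List.pyGet?_neg_one]

theorem pvGenOf_toList (s : String) : (pvGenOf s).toList = s.toList.dropLast ++ ['G'] := by
  have := pvStem_toList s
  simp only [pvGenOf, pvStem] at *
  simp [this]

theorem pvLast_genOf (s : String) : pvLast (pvGenOf s) = some 'G' := by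
  simp [pvLast_eq, pvGenOf_toList]

theorem pvStem_genOf (s : String) : pvStem (pvGenOf s) = pvStem s := by
  apply String.toList_inj.mp
  simp [pvStem_toList, pvGenOf_toList]

-- a nonempty string with last char 'G' and the same stem as s IS pvGenOf s
theorem eq_genOf_of_stem_eq (e s : String) (he : e ≠ "") (hg : pvLast e = some 'G')
    (hst : pvStem e = pvStem s) : e = pvGenOf s := by
  apply String.toList_inj.mp
  have hne : e.toList ≠ [] := by
    intro h; apply he; apply String.toList_inj.mp; simp [h]
  have hlast : e.toList.getLast? = some 'G' := by rw [← pvLast_eq]; exact hg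
  have hsplit : e.toList.dropLast ++ [e.toList.getLast hne] = e.toList :=
    List.dropLast_append_getLast hne
  have hG : e.toList.getLast hne = 'G' := by
    have h2 := List.getLast?_eq_some_getLast (l := e.toList) hne
    rw [h2] at hlast; exact Option.some_injective _ hlast
  have hdrop : e.toList.dropLast = s.toList.dropLast := by
    rw [← pvStem_toList, ← pvStem_toList, hst]
  rw [pvGenOf_toList, ← hsplit, hG, hdrop]

theorem set_contains_ofList (xs : List String) (z : String) :
    PySem.Set.contains (PySem.Set.ofList xs) z = xs.contains z := by
  rw [Bool.eq_iff_iff]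
  simp [PySem.Set.contains, PySem.Set.mem_ofList]

-- == the combination check: B's counting fold computes A's filter data ==
theorem pvCount_gen (l : List String) (k : Int) (d : String) :
    l.foldl (fun (st : Int × String) c => if pvLast c == some 'M' then (st.1 + 1, c) else st) (k, d)
      = (k + (l.filter (fun c => pvLast c == some 'M')).length,
         (l.filter (fun c => pvLast c == some 'M')).getLastD d) := by
  induction l generalizing k d with
  | nil => simp
  | cons c l ih =>
    by_cases hc : (pvLast c == some 'M') = true
    · simp only [List.foldl_cons, List.filter_cons, hc, ih, List.getLastD_cons, if_true]
      refine Prod.ext ?_ rfl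
      simp only [List.length_cons]
      push_cast
      ring
    · simp only [List.foldl_cons, List.filter_cons, hc, ih]
      simp

theorem pvCount_eq (comb : List String) :
    pvCount comb = (((comb.filter (fun c => pvLast c == some 'M')).length : Int),
      (comb.filter (fun c => pvLast c == some 'M')).getLastD "") := by
  unfold pvCount
  rw [pvCount_gen]
  simp

-- == the run-scan invariant ==
def pvInv (P : List String) (st : BState) : Prop :=
  st.cur = P.getLast?.map pvStem ∧
  (∀ p ∈ P, ∀ s, st.cur = some s → pvStem p ≤ s) ∧
  (st.rg = true ↔ ∃ g ∈ P, some (pvStem g) = st.cur ∧ pvLast g = some 'G') ∧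
  (st.rc = true ↔ ∃ g ∈ P, some (pvStem g) = st.cur ∧ pvLast g = some 'M') ∧
  (st.hg = true ↔ ∃ g ∈ P, pvLast g = some 'G') ∧
  (st.bad = true ↔ ∃ e ∈ P, pvLast e = some 'M' ∧ some (pvStem e) ≠ st.cur ∧
      ¬∃ g ∈ P, pvStem g = pvStem e ∧ pvLast g = some 'G')

theorem pvStep_inv (P : List String) (a : String) (st : BState) (h : pvInv P st)
    (hPa : ∀ p ∈ P, pvStem p ≤ pvStem a) : pvInv (P ++ [a]) (pvStepB st a) := by
  obtain ⟨hcur, hle, hrg, hrc, hhg, hbad⟩ := h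
  by_cases hflush : st.cur ≠ some (pvStem a)
  · -- a new run starts: every element of P has a strictly smaller stem
    have hlt : ∀ p ∈ P, pvStem p < pvStem a := by
      intro p hp
      rcases hP : P.getLast? with _ | l
      · rw [List.getLast?_eq_none_iff] at hP; subst hP; simp at hp
      · have hl : l ∈ P := List.mem_of_getLast? hP
        have hs : st.cur = some (pvStem l) := by rw [hcur, hP]; rfl
        have h1 : pvStem p ≤ pvStem l := hle p hp _ hs
        have h3 : pvStem l ≠ pvStem a := fun he => hflush (by rw [hs, he])
        exact lt_of_le_of_lt h1 (lt_of_le_of_ne (hPa l hl) h3)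
    have hPne : ∀ g ∈ P, pvStem g ≠ pvStem a := fun g hg => ne_of_lt (hlt g hg)
    have hLE : ∀ p ∈ P ++ [a], ∀ s, some (pvStem a) = some s → pvStem p ≤ s := by
      intro p hp s hs
      obtain rfl : pvStem a = s := Option.some.inj hs
      rcases List.mem_append.mp hp with hp | hp
      · exact le_of_lt (hlt p hp)
      · rw [List.mem_singleton.mp hp]
    have hBAD : (st.bad || (st.rc && !st.rg)) = true ↔
        ∃ e ∈ P ++ [a], pvLast e = some 'M' ∧ some (pvStem e) ≠ some (pvStem a) ∧
          ¬∃ g ∈ P ++ [a], pvStem g = pvStem e ∧ pvLast g = some 'G' := by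
      constructor
      · intro hb
        rcases Bool.or_eq_true_iff.mp hb with hb | hb
        · obtain ⟨e, he, hM, hne, hnog⟩ := hbad.mp hb
          refine ⟨e, List.mem_append.mpr (Or.inl he), hM, ?_, ?_⟩
          · intro hh
            exact hPne e he (Option.some.inj hh)
          · rintro ⟨g, hg', hstem, hGg⟩
            rcases List.mem_append.mp hg' with hg' | hg'
            · exact hnog ⟨g, hg', hstem, hGg⟩
            · rw [List.mem_singleton.mp hg'] at hstem
              exact hPne e he hstem.symm
        · obtain ⟨hrcT, hrgF⟩ := Bool.and_eq_true_iff.mp hb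
          rw [Bool.not_eq_true'] at hrgF
          obtain ⟨c0, hc0, hsc, hM⟩ := hrc.mp hrcT
          refine ⟨c0, List.mem_append.mpr (Or.inl hc0), hM, ?_, ?_⟩
          · intro hh
            exact hPne c0 hc0 (Option.some.inj hh)
          · rintro ⟨g, hg', hstem, hGg⟩
            rcases List.mem_append.mp hg' with hg' | hg'
            · have : st.rg = true := hrg.mpr ⟨g, hg', by rw [hstem]; exact hsc, hGg⟩
              rw [this] at hrgF; exact absurd hrgF (by decide)
            · rw [List.mem_singleton.mp hg'] at hstem
              exact hPne c0 hc0 hstem.symm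
      · rintro ⟨e, he, hM, hne, hnog⟩
        rcases List.mem_append.mp he with he | he
        · by_cases hsc : some (pvStem e) = st.cur
          · have hrcT : st.rc = true := hrc.mpr ⟨e, he, hsc, hM⟩
            have hrgF : st.rg = false := by
              by_contra h'
              rw [Bool.not_eq_false] at h'
              obtain ⟨g, hg', hscg, hGg⟩ := hrg.mp h'
              exact hnog ⟨g, List.mem_append.mpr (Or.inl hg'),
                Option.some.inj (hscg.trans hsc.symm), hGg⟩
            rw [hrcT, hrgF]; simp
          · have : st.bad = true := hbad.mpr ⟨e, he, hM, hsc, fun ⟨g, hg', hstem, hGg⟩ =>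
              hnog ⟨g, List.mem_append.mpr (Or.inl hg'), hstem, hGg⟩⟩
            rw [this]; simp
        · rw [List.mem_singleton.mp he] at hne
          exact absurd rfl hne
    by_cases hG : pvLast a = some 'G'
    · have hst' : pvStepB st a =
          ⟨some (pvStem a), true, false, true, st.bad || (st.rc && !st.rg)⟩ := by
        simp [pvStepB, hflush, hG]
      rw [hst']
      refine ⟨by simp, hLE, ?_, ?_, ?_, hBAD⟩
      · exact iff_of_true rfl ⟨a, List.mem_append.mpr (Or.inr (by simp)), rfl, hG⟩
      · refine iff_of_false (by simp) ?_
        rintro ⟨g, hg', hsg, hMg⟩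
        rcases List.mem_append.mp hg' with hg' | hg'
        · exact hPne g hg' (Option.some.inj hsg)
        · rw [List.mem_singleton.mp hg'] at hMg
          rw [hG] at hMg; exact absurd hMg (by decide)
      · exact iff_of_true rfl ⟨a, List.mem_append.mpr (Or.inr (by simp)), hG⟩
    · have hHG : st.hg = true ↔ ∃ g ∈ P ++ [a], pvLast g = some 'G' := by
        rw [hhg]
        constructor
        · rintro ⟨g, hg', hGg⟩
          exact ⟨g, List.mem_append.mpr (Or.inl hg'), hGg⟩
        · rintro ⟨g, hg', hGg⟩
          rcases List.mem_append.mp hg' with hg' | hg'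
          · exact ⟨g, hg', hGg⟩
          · rw [List.mem_singleton.mp hg'] at hGg; exact absurd hGg hG
      by_cases hM : pvLast a = some 'M'
      · have hst' : pvStepB st a =
            ⟨some (pvStem a), false, true, st.hg, st.bad || (st.rc && !st.rg)⟩ := by
          simp [pvStepB, hflush, hM]
        rw [hst']
        refine ⟨by simp, hLE, ?_, ?_, hHG, hBAD⟩
        · refine iff_of_false (by simp) ?_
          rintro ⟨g, hg', hsg, hGg⟩
          rcases List.mem_append.mp hg' with hg' | hg'
          · exact hPne g hg' (Option.some.inj hsg)
          · rw [List.mem_singleton.mp hg'] at hGg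
            rw [hM] at hGg; exact absurd hGg (by decide)
        · exact iff_of_true rfl ⟨a, List.mem_append.mpr (Or.inr (by simp)), rfl, hM⟩
      · have hst' : pvStepB st a =
            ⟨some (pvStem a), false, false, st.hg, st.bad || (st.rc && !st.rg)⟩ := by
          simp [pvStepB, hflush, hG, hM]
        rw [hst']
        refine ⟨by simp, hLE, ?_, ?_, hHG, hBAD⟩
        · refine iff_of_false (by simp) ?_
          rintro ⟨g, hg', hsg, hGg⟩
          rcases List.mem_append.mp hg' with hg' | hg'
          · exact hPne g hg' (Option.some.inj hsg)
          · rw [List.mem_singleton.mp hg'] at hGg; exact absurd hGg hG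
        · refine iff_of_false (by simp) ?_
          rintro ⟨g, hg', hsg, hMg⟩
          rcases List.mem_append.mp hg' with hg' | hg'
          · exact hPne g hg' (Option.some.inj hsg)
          · rw [List.mem_singleton.mp hg'] at hMg; exact absurd hMg hM
  · -- same run continues
    rw [not_not] at hflush
    have hLE : ∀ p ∈ P ++ [a], ∀ s, st.cur = some s → pvStem p ≤ s := by
      intro p hp s hs
      rcases List.mem_append.mp hp with hp | hp
      · exact hle p hp s hs
      · rw [hflush] at hs
        obtain rfl : pvStem a = s := Option.some.inj hs
        rw [List.mem_singleton.mp hp]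
    have hBAD : st.bad = true ↔
        ∃ e ∈ P ++ [a], pvLast e = some 'M' ∧ some (pvStem e) ≠ st.cur ∧
          ¬∃ g ∈ P ++ [a], pvStem g = pvStem e ∧ pvLast g = some 'G' := by
      constructor
      · intro hb
        obtain ⟨e, he, hM, hne, hnog⟩ := hbad.mp hb
        refine ⟨e, List.mem_append.mpr (Or.inl he), hM, hne, ?_⟩
        rintro ⟨g, hg', hstem, hGg⟩
        rcases List.mem_append.mp hg' with hg' | hg'
        · exact hnog ⟨g, hg', hstem, hGg⟩
        · rw [List.mem_singleton.mp hg'] at hstem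
          exact hne (by rw [← hstem, hflush])
      · rintro ⟨e, he, hM, hne, hnog⟩
        rcases List.mem_append.mp he with he | he
        · exact hbad.mpr ⟨e, he, hM, hne, fun ⟨g, hg', hstem, hGg⟩ =>
            hnog ⟨g, List.mem_append.mpr (Or.inl hg'), hstem, hGg⟩⟩
        · rw [List.mem_singleton.mp he] at hne
          exact absurd hflush.symm hne
    have hCUR : st.cur = ((P ++ [a]).getLast?).map pvStem := by
      rw [hflush]; simp
    by_cases hG : pvLast a = some 'G'
    · have hst' : pvStepB st a = ⟨st.cur, true, st.rc, true, st.bad⟩ := by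
        simp [pvStepB, hflush, hG]
      rw [hst']
      refine ⟨hCUR, hLE, ?_, ?_, ?_, hBAD⟩
      · exact iff_of_true rfl ⟨a, List.mem_append.mpr (Or.inr (by simp)), hflush.symm, hG⟩
      · rw [hrc]
        constructor
        · rintro ⟨g, hg', hsg, hMg⟩
          exact ⟨g, List.mem_append.mpr (Or.inl hg'), hsg, hMg⟩
        · rintro ⟨g, hg', hsg, hMg⟩
          rcases List.mem_append.mp hg' with hg' | hg'
          · exact ⟨g, hg', hsg, hMg⟩
          · rw [List.mem_singleton.mp hg'] at hMg
            rw [hG] at hMg; exact absurd hMg (by decide)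
      · exact iff_of_true rfl ⟨a, List.mem_append.mpr (Or.inr (by simp)), hG⟩
    · have hHG : st.hg = true ↔ ∃ g ∈ P ++ [a], pvLast g = some 'G' := by
        rw [hhg]
        constructor
        · rintro ⟨g, hg', hGg⟩
          exact ⟨g, List.mem_append.mpr (Or.inl hg'), hGg⟩
        · rintro ⟨g, hg', hGg⟩
          rcases List.mem_append.mp hg' with hg' | hg'
          · exact ⟨g, hg', hGg⟩
          · rw [List.mem_singleton.mp hg'] at hGg; exact absurd hGg hG
      have hRG : st.rg = true ↔
          ∃ g ∈ P ++ [a], some (pvStem g) = st.cur ∧ pvLast g = some 'G' := by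
        rw [hrg]
        constructor
        · rintro ⟨g, hg', hsg, hGg⟩
          exact ⟨g, List.mem_append.mpr (Or.inl hg'), hsg, hGg⟩
        · rintro ⟨g, hg', hsg, hGg⟩
          rcases List.mem_append.mp hg' with hg' | hg'
          · exact ⟨g, hg', hsg, hGg⟩
          · rw [List.mem_singleton.mp hg'] at hGg; exact absurd hGg hG
      by_cases hM : pvLast a = some 'M'
      · have hst' : pvStepB st a = ⟨st.cur, st.rg, true, st.hg, st.bad⟩ := by
          simp [pvStepB, hflush, hM]
        rw [hst']
        refine ⟨hCUR, hLE, hRG, ?_, hHG, hBAD⟩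
        exact iff_of_true rfl ⟨a, List.mem_append.mpr (Or.inr (by simp)), hflush.symm, hM⟩
      · have hst' : pvStepB st a = st := by
          simp [pvStepB, hflush, hG, hM]
        rw [hst']
        refine ⟨hCUR, hLE, hRG, ?_, hHG, hBAD⟩
        rw [hrc]
        constructor
        · rintro ⟨g, hg', hsg, hMg⟩
          exact ⟨g, List.mem_append.mpr (Or.inl hg'), hsg, hMg⟩
        · rintro ⟨g, hg', hsg, hMg⟩
          rcases List.mem_append.mp hg' with hg' | hg'
          · exact ⟨g, hg', hsg, hMg⟩
          · rw [List.mem_singleton.mp hg'] at hMg; exact absurd hMg hM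

theorem pvFold_inv (R P : List String) (st : BState) (h : pvInv P st)
    (hPW : (P ++ R).Pairwise (fun a b => pvStem a ≤ pvStem b)) :
    pvInv (P ++ R) (R.foldl pvStepB st) := by
  induction R generalizing P st with
  | nil => simpa using h
  | cons a R ih =>
    have h1 : ∀ p ∈ P, pvStem p ≤ pvStem a := by
      intro p hp
      exact (List.pairwise_append.mp hPW).2.2 p hp a (by simp)
    have h2 := pvStep_inv P a st h h1
    have h3 : ((P ++ [a]) ++ R).Pairwise (fun a b => pvStem a ≤ pvStem b) := by
      rw [List.append_assoc]; simpa using hPW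
    have := ih (P ++ [a]) (pvStepB st a) h2 h3
    simpa [List.foldl_cons, List.append_assoc] using this

theorem pvScan_spec (L : List String) (hPW : L.Pairwise (fun a b => pvStem a ≤ pvStem b)) :
    ((L.foldl pvStepB ⟨none, false, false, false, false⟩).hg = true ↔ ∃ g ∈ L, pvLast g = some 'G') ∧
    (((L.foldl pvStepB ⟨none, false, false, false, false⟩).bad
        || ((L.foldl pvStepB ⟨none, false, false, false, false⟩).rc
            && !(L.foldl pvStepB ⟨none, false, false, false, false⟩).rg)) = true
      ↔ ∃ e ∈ L, pvLast e = some 'M' ∧ ¬∃ g ∈ L, pvStem g = pvStem e ∧ pvLast g = some 'G') := by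
  have h0 : pvInv [] ⟨none, false, false, false, false⟩ := by
    refine ⟨rfl, ?_, ?_, ?_, ?_, ?_⟩ <;> simp
  have h := pvFold_inv L [] _ h0 (by simpa using hPW)
  rw [List.nil_append] at h
  obtain ⟨hcur, hle, hrg, hrc, hhg, hbad⟩ := h
  refine ⟨hhg, ?_⟩
  constructor
  · intro hb
    rcases Bool.or_eq_true_iff.mp hb with hb | hb
    · obtain ⟨e, he, hM, _, hnog⟩ := hbad.mp hb
      exact ⟨e, he, hM, hnog⟩
    · obtain ⟨hrcT, hrgF⟩ := Bool.and_eq_true_iff.mp hb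
      rw [Bool.not_eq_true'] at hrgF
      obtain ⟨c0, hc0, hsc, hM⟩ := hrc.mp hrcT
      refine ⟨c0, hc0, hM, ?_⟩
      rintro ⟨g, hg', hstem, hGg⟩
      have : (L.foldl pvStepB ⟨none, false, false, false, false⟩).rg = true :=
        hrg.mpr ⟨g, hg', by rw [hstem]; exact hsc, hGg⟩
      rw [this] at hrgF; exact absurd hrgF (by decide)
  · rintro ⟨e, he, hM, hnog⟩
    by_cases hsc : some (pvStem e) = (L.foldl pvStepB ⟨none, false, false, false, false⟩).cur
    · have hrcT := hrc.mpr ⟨e, he, hsc, hM⟩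
      have hrgF : (L.foldl pvStepB ⟨none, false, false, false, false⟩).rg = false := by
        by_contra h'
        rw [Bool.not_eq_false] at h'
        obtain ⟨g, hg', hscg, hGg⟩ := hrg.mp h'
        exact hnog ⟨g, hg', Option.some.inj (hscg.trans hsc.symm), hGg⟩
      rw [hrcT, hrgF]; simp
    · have : (L.foldl pvStepB ⟨none, false, false, false, false⟩).bad = true :=
        hbad.mpr ⟨e, he, hM, hsc, hnog⟩
      rw [this]; simp

-- proof-side names for the two halves of each port (definitionally equal to the port bodies)
def pvCondA (comb : List String) : Bool :=
  (comb.filter (fun c => pvLast c == some 'M')).length == 1 && decide (comb.length > 1)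
    && !(comb.contains (pvGenOf ((comb.filter (fun c => pvLast c == some 'M')).headD "")))

def pvBodyA (comb alle : List String) : Bool :=
  if ((alle.filter (fun elt => !(comb.contains elt))).filter (fun elt => pvLast elt == some 'M')).any
      (fun elt =>
        !((alle.filter (fun elt => !(comb.contains elt))).contains (pvGenOf elt))
          && !(((alle.filter (fun elt => !(comb.contains elt))).filter (fun e => pvLast e == some 'G')).isEmpty)) then
    false
  else
    true

def pvCondB (comb : List String) : Bool :=
  (pvCount comb).1 == 1 && decide (comb.length > 1)
    && !(comb.contains (pvAddG (pvStem (pvCount comb).2)))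

def pvRest (comb alle : List String) : List String :=
  PySem.List.sorted (alle.filter (fun e => !(PySem.Set.contains (PySem.Set.ofList comb) e)))
    (fun e => pvStem e)

def pvSt (comb alle : List String) : BState :=
  (pvRest comb alle).foldl pvStepB ⟨none, false, false, false, false⟩

def pvBodyB (comb alle : List String) : Bool :=
  !((pvSt comb alle).hg && ((pvSt comb alle).bad || ((pvSt comb alle).rc && !(pvSt comb alle).rg)))

theorem cond_eq (comb : List String) : pvCondA comb = pvCondB comb := by
  unfold pvCondA pvCondB
  rw [pvCount_eq]
  by_cases hn : (comb.filter (fun c => pvLast c == some 'M')).length = 1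
  · obtain ⟨x, hx⟩ := List.length_eq_one_iff.mp hn
    rw [hx]
    simp [pvGenOf_eq_pvAddG_pvStem]
  · have h1 : ((comb.filter (fun c => pvLast c == some 'M')).length == 1) = false := by
      rw [beq_eq_false_iff_ne]; exact hn
    have h2 : ((((comb.filter (fun c => pvLast c == some 'M')).length : Nat) : Int) == 1) = false := by
      rw [beq_eq_false_iff_ne]
      intro hh
      exact hn (by exact_mod_cast hh)
    rw [h1, h2]
    simp

theorem body_eq (comb alle : List String) (hNE : ∀ s ∈ alle, s ≠ "") :
    pvBodyA comb alle = pvBodyB comb alle := by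
  unfold pvBodyA pvBodyB pvSt
  have hLset : pvRest comb alle
      = PySem.List.sorted (alle.filter (fun elt => !(comb.contains elt))) (fun e => pvStem e) := by
    unfold pvRest
    congr 1
    apply List.filter_congr
    intro x _
    rw [set_contains_ofList]
  set L := alle.filter (fun elt => !(comb.contains elt)) with hL
  have hNEL : ∀ s ∈ L, s ≠ "" := by
    intro s hs; exact hNE s (List.mem_filter.mp hs).1
  set R := pvRest comb alle with hRdef
  have hPWR : R.Pairwise (fun a b => pvStem a ≤ pvStem b) := by
    rw [hLset]; exact PySem.List.sorted_pairwise L _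
  obtain ⟨hHG, hBAD⟩ := pvScan_spec R hPWR
  have hmem : ∀ x, x ∈ R ↔ x ∈ L := by
    intro x; rw [hLset]; exact PySem.List.mem_sorted L _ _ x
  set st := R.foldl pvStepB (⟨none, false, false, false, false⟩ : BState) with hst
  have hAny : (L.filter (fun elt => pvLast elt == some 'M')).any (fun elt =>
        !(L.contains (pvGenOf elt))
          && !((L.filter (fun e => pvLast e == some 'G')).isEmpty))
      = (st.hg && (st.bad || (st.rc && !st.rg))) := by
    rw [Bool.eq_iff_iff]
    constructor
    · intro h'
      obtain ⟨elt, heltF, hb⟩ := List.any_eq_true.mp h'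
      obtain ⟨heltL, hMb⟩ := List.mem_filter.mp heltF
      have hMe : pvLast elt = some 'M' := by simpa using hMb
      obtain ⟨hnc, hgne⟩ := Bool.and_eq_true_iff.mp hb
      rw [Bool.not_eq_true'] at hnc
      have hgne' : (L.filter (fun e => pvLast e == some 'G')) ≠ [] := by
        intro hh; rw [hh] at hgne; simp at hgne
      obtain ⟨g0, hg0⟩ := List.exists_mem_of_ne_nil _ hgne'
      obtain ⟨hg0L, hg0G⟩ := List.mem_filter.mp hg0
      have hg0G' : pvLast g0 = some 'G' := by simpa using hg0G
      refine Bool.and_eq_true_iff.mpr ⟨hHG.mpr ⟨g0, (hmem g0).mpr hg0L, hg0G'⟩,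
        hBAD.mpr ⟨elt, (hmem elt).mpr heltL, hMe, ?_⟩⟩
      rintro ⟨g, hgR, hstem, hGg⟩
      have hgL := (hmem g).mp hgR
      have hgeq : g = pvGenOf elt := eq_genOf_of_stem_eq g elt (hNEL g hgL) hGg hstem
      rw [hgeq] at hgL
      have hcont : L.contains (pvGenOf elt) = true := by simpa using hgL
      rw [hnc] at hcont
      exact absurd hcont Bool.false_ne_true
    · intro h'
      obtain ⟨hhg', hbad'⟩ := Bool.and_eq_true_iff.mp h'
      obtain ⟨e, heR, hMe, hnog⟩ := hBAD.mp hbad'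
      obtain ⟨g0, hg0R, hg0G⟩ := hHG.mp hhg'
      refine List.any_eq_true.mpr ⟨e, List.mem_filter.mpr ⟨(hmem e).mp heR, by simp [hMe]⟩, ?_⟩
      refine Bool.and_eq_true_iff.mpr ⟨?_, ?_⟩
      · have hnotin : pvGenOf e ∉ L := by
          intro hin
          exact hnog ⟨pvGenOf e, (hmem _).mpr hin, pvStem_genOf e, pvLast_genOf e⟩
        simp [hnotin]
      · have hg0mem : g0 ∈ L.filter (fun x => pvLast x == some 'G') :=
          List.mem_filter.mpr ⟨(hmem g0).mp hg0R, by simp [hg0G]⟩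
        simp only [Bool.not_eq_true', List.isEmpty_eq_false_iff]
        exact List.ne_nil_of_mem hg0mem
  rw [hAny]
  cases h' : (st.hg && (st.bad || (st.rc && !st.rg))) <;> simp

-- ===== VERDICT (by name: the statement is the Claim_ definition above) =====
theorem is_valid_together_spec : Claim_equal_is_valid_together := by
  intro comb alle _hdom hpre
  show is_valid_together comb alle = is_valid_together_alt comb alle
  show (if pvCondA comb then false else pvBodyA comb alle)
      = (if pvCondB comb then false else pvBodyB comb alle)
  rw [cond_eq, body_eq comb alle hpre.2]
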